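-- pv_equiv track=rewrite | github.com/KingICCrab/pim_mapper | validation/dram/permutation_experiments/multi_mapping_v2.py | compute_formula_prediction
-- ===== SOURCE A (Python) =====
-- import math
--
-- def compute_formula_prediction(
--     P_l3, Q_l3, C_l3, K_l3, R_l2, P_buffer, Q_buffer, S,
--     block_h, block_w, H_in, W_in
-- ) -> int:
--     """简化公式预测 row switches"""
--     num_h_blocks = math.ceil(H_in / block_h)
--     num_w_blocks = math.ceil(W_in / block_w)
--
--     # 计算 Q tiles 中有多少跨 w_block 边界
--     q_crossing = 0
--     for q in range(Q_l3):
--         w_start = q * Q_buffer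
--         w_end = w_start + Q_buffer + S - 2
--         wb_start = w_start // block_w
--         wb_end = min(w_end // block_w, num_w_blocks - 1)
--         if wb_end > wb_start:
--             q_crossing += 1
--
--     # 1. multi_block switches
--     multi_block = 0
--     for q in range(Q_l3):
--         w_start = q * Q_buffer
--         w_end = w_start + Q_buffer + S - 2
--         wb_start = w_start // block_w
--         wb_end = min(w_end // block_w, num_w_blocks - 1)
--         multi_block += (wb_end - wb_start)
--     multi_block *= P_l3 * R_l2 * C_l3 * K_l3
--
--     # 2. R switches (简化估计)
--     r_switches = q_crossing * P_l3 * (R_l2 - 1) * C_l3 * K_l3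
--
--     # 3. P switches
--     p_switches = (P_l3 - 1) * C_l3 * K_l3
--
--     # 4. Q switches
--     q_switches_per_prck = 0
--     for q in range(1, Q_l3):
--         w_end_prev = (q - 1) * Q_buffer + Q_buffer + S - 2
--         wb_prev = min(w_end_prev // block_w, num_w_blocks - 1)
--         wb_curr = q * Q_buffer // block_w
--         if wb_prev != wb_curr:
--             q_switches_per_prck += 1
--     q_switches = q_switches_per_prck * P_l3 * R_l2 * C_l3 * K_l3
--
--     # 5. C & K switches
--     c_switches = (C_l3 - 1) * K_l3
--     k_switches = K_l3 - 1
--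
--     return multi_block + r_switches + p_switches + q_switches + c_switches + k_switches
-- ===== SOURCE B (Python) =====
-- def _floor_sum(n, a, b, m):
--     """sum((a*i + b) // m for i in range(n)) for m > 0, n >= 0, in O(log) time
--     (Euclid-style recursion on the modulus)."""
--     if n <= 0 or m <= 0:
--         return 0
--     qa, ra = divmod(a, m)
--     qb, rb = divmod(b, m)
--     acc = qa * (n * (n - 1) // 2) + qb * n
--     if ra == 0:
--         return acc
--     y = (ra * (n - 1) + rb) // m
--     if y <= 0:
--         return acc
--     return acc + n * y - _floor_sum(y, m, m + ra - rb - 1, ra)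
--
--
-- def _le_seg(a, b, C, lo, hi):
--     """the (contiguous) subinterval [l, h) of [lo, hi) on which a*q + b <= C."""
--     if hi <= lo:
--         return (lo, lo)
--     if a == 0:
--         return (lo, hi) if b <= C else (lo, lo)
--     if a > 0:  # prefix: q <= (C - b) // a
--         return (lo, min(hi, max(lo, (C - b) // a + 1)))
--     # a < 0: suffix: q >= -((C - b) // -a)  (ceiling)
--     return (max(lo, min(hi, -((C - b) // -a))), hi)
--
--
-- def _seg_len(a, b, C, lo, hi):
--     """how many q in [lo, hi) satisfy a*q + b <= C."""
--     l, h = _le_seg(a, b, C, lo, hi)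
--     return h - l
--
--
-- def _FS(a, m, l, h, b):
--     """sum of (a*q + b) // m over q in [l, h)."""
--     return _floor_sum(h - l, a, b + a * l, m)
--
--
-- def _clamp_sum(a, m, c, l, h):
--     """sum of c - (a*q) // m over q in [l, h)."""
--     return (h - l) * c - _FS(a, m, l, h, 0)
--
--
-- def _cnt_ne_c(a, m, c, l, h):
--     """how many q in [l, h) have (a*q) // m != c."""
--     return (h - l) - (_seg_len(a, 0, (c + 1) * m - 1, l, h) - _seg_len(a, 0, c * m - 1, l, h))
--
--
-- def compute_formula_prediction(
--     P_l3, Q_l3, C_l3, K_l3, R_l2, P_buffer, Q_buffer, S,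
--     block_h, block_w, H_in, W_in
-- ) -> int:
--     # closed-form row-switch estimate: the floor-division sums over the Q tiles
--     # are evaluated with an O(log) Euclid floor-sum, and the clamp thresholds
--     # (min with num_w_blocks - 1) are solved in closed form
--     num_w_blocks = -(-W_in // block_w)
--     c = num_w_blocks - 1
--     n = max(Q_l3, 0)
--     # normalise the modulus: v // block_w == (sg*v) // m with m = |block_w| > 0
--     if block_w > 0:
--         m, a, be = block_w, Q_buffer, Q_buffer + S - 2
--     else:
--         m, a, be = -block_w, -Q_buffer, -(Q_buffer + S - 2)
--     # s(q) = (a*q) // m ; e(q) = (a*q + be) // m ; tile q spans rows s(q) .. min(e(q), c)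
--     C0 = (c + 1) * m - 1          # e(q) <= c  <=>  a*q + be <= C0
--
--     # ---- sum1 = sum over [0, n) of min(e(q), c) - s(q), split at the clamp threshold
--     ul, uh = _le_seg(a, be, C0, 0, n)
--     sum1 = (_FS(a, m, ul, uh, be) - _FS(a, m, ul, uh, 0)) \
--         + _clamp_sum(a, m, c, 0, ul) + _clamp_sum(a, m, c, uh, n)
--
--     # ---- cnt1 = #{q in [0, n) : min(e(q), c) > s(q)}
--     k0 = be // m                  # e(q) - s(q) is k0 or k0 + 1
--     lenu = uh - ul
--     top = (_FS(a, m, ul, uh, be) - _FS(a, m, ul, uh, 0)) - lenu * k0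
--     if k0 >= 1:
--         cnt1u = lenu
--     elif k0 == 0:
--         cnt1u = top
--     else:
--         cnt1u = 0
--     cnt1 = cnt1u + _seg_len(a, 0, c * m - 1, 0, ul) + _seg_len(a, 0, c * m - 1, uh, n)
--
--     # ---- cnt2 = #{q in [1, n) : min(e(q-1), c) != s(q)};  e(q-1) = (a*q + bg) // m
--     bg = be - a
--     n2 = max(n, 1)
--     vl, vh = _le_seg(a, bg, C0, 1, n2)
--     k1 = bg // m                  # e(q-1) - s(q) is k1 or k1 + 1
--     lenv = vh - vl
--     topv = (_FS(a, m, vl, vh, bg) - _FS(a, m, vl, vh, 0)) - lenv * k1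
--     if k1 == 0:
--         zeros = lenv - topv
--     elif k1 == -1:
--         zeros = topv
--     else:
--         zeros = 0
--     cnt2 = (lenv - zeros) + _cnt_ne_c(a, m, c, 1, vl) + _cnt_ne_c(a, m, c, vh, n2)
--
--     prck = P_l3 * R_l2 * C_l3 * K_l3
--     return (sum1 * prck
--             + cnt1 * P_l3 * (R_l2 - 1) * C_l3 * K_l3
--             + (P_l3 - 1) * C_l3 * K_l3
--             + cnt2 * prck
--             + (C_l3 - 1) * K_l3
--             + (K_l3 - 1))
-- ===== Notes on version B (the rewrite author's own statement) =====
-- stated objective: faster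
-- what changed: The three O(Q_l3) loops over Q tiles are replaced by closed-form arithmetic: an O(log) Euclid-style floor-sum evaluates the floor-division sums, clamp thresholds (min with num_w_blocks-1) are solved in closed form as linear inequalities, and the boundary-crossing counts are recovered from the floor-sums via the fact that consecutive floor differences take only two values.
import Mathlib
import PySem

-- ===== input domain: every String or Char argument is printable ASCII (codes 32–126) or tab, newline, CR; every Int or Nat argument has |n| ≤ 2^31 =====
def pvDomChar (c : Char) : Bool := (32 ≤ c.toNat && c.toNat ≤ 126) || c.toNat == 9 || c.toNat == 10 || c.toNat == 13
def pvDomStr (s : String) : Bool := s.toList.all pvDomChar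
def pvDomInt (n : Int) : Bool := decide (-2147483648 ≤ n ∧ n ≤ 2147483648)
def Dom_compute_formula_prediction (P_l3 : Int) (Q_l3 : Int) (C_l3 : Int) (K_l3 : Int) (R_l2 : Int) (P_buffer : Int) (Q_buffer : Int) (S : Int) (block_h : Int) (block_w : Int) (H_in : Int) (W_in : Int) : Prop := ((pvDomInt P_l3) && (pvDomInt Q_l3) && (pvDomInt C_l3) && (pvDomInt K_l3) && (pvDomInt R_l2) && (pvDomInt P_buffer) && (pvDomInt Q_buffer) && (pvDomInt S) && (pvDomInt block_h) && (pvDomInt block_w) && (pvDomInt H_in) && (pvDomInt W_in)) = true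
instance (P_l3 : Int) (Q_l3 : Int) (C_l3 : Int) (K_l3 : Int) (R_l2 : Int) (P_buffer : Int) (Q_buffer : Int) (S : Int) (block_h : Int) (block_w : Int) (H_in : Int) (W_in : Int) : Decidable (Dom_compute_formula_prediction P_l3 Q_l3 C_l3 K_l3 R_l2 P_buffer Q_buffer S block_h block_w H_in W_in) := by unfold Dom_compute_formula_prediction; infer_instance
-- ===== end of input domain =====

-- B replaces A's three O(Q_l3) loops over the Q tiles by closed-form arithmetic: an
-- O(log) Euclid-style floor-sum for the floor-division sums, closed-form clamp
-- thresholds, and crossing counts recovered from the two-valued floor differences.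


-- ===== PORT A =====
-- math.ceil(x / y) on ints is ported as -((-x) // y); exact on Dom (|x|,|y| ≤ 2^31,
-- where the float quotient cannot round across an integer).
def compute_formula_prediction (P_l3 : Int) (Q_l3 : Int) (C_l3 : Int) (K_l3 : Int) (R_l2 : Int) (P_buffer : Int) (Q_buffer : Int) (S : Int) (block_h : Int) (block_w : Int) (H_in : Int) (W_in : Int) : Int :=
  let _num_h_blocks := -(PySem.Int.floordiv (-H_in) block_h)
  let num_w_blocks := -(PySem.Int.floordiv (-W_in) block_w)
  let q_crossing := (PySem.List.pyRange 0 Q_l3 1).foldl (fun acc q =>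
      let w_start := q * Q_buffer
      let w_end := w_start + Q_buffer + S - 2
      let wb_start := PySem.Int.floordiv w_start block_w
      let wb_end := min (PySem.Int.floordiv w_end block_w) (num_w_blocks - 1)
      if wb_end > wb_start then acc + 1 else acc) 0
  let multi_block := ((PySem.List.pyRange 0 Q_l3 1).foldl (fun acc q =>
      let w_start := q * Q_buffer
      let w_end := w_start + Q_buffer + S - 2
      let wb_start := PySem.Int.floordiv w_start block_w
      let wb_end := min (PySem.Int.floordiv w_end block_w) (num_w_blocks - 1)
      acc + (wb_end - wb_start)) 0) * (P_l3 * R_l2 * C_l3 * K_l3)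
  let r_switches := q_crossing * P_l3 * (R_l2 - 1) * C_l3 * K_l3
  let p_switches := (P_l3 - 1) * C_l3 * K_l3
  let q_switches := ((PySem.List.pyRange 1 Q_l3 1).foldl (fun acc q =>
      let w_end_prev := (q - 1) * Q_buffer + Q_buffer + S - 2
      let wb_prev := min (PySem.Int.floordiv w_end_prev block_w) (num_w_blocks - 1)
      let wb_curr := PySem.Int.floordiv (q * Q_buffer) block_w
      if wb_prev ≠ wb_curr then acc + 1 else acc) 0) * (P_l3 * R_l2 * C_l3 * K_l3)
  let c_switches := (C_l3 - 1) * K_l3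
  let k_switches := K_l3 - 1
  multi_block + r_switches + p_switches + q_switches + c_switches + k_switches

-- ===== PORT B =====
-- _floor_sum of Source B: sum((a*i + b) // m for i in range(n)), m > 0, by Euclid recursion
def pvFloorSum (n a b m : Int) : Int :=
  if h : n ≤ 0 ∨ m ≤ 0 then 0
  else
    let qa := PySem.Int.floordiv a m
    let ra := PySem.Int.mod a m
    let qb := PySem.Int.floordiv b m
    let rb := PySem.Int.mod b m
    let acc := qa * (PySem.Int.floordiv (n * (n - 1)) 2) + qb * n
    if hra : ra = 0 then acc
    else
      let y := PySem.Int.floordiv (ra * (n - 1) + rb) m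
      if y ≤ 0 then acc
      else acc + n * y - pvFloorSum y m (m + ra - rb - 1) ra
termination_by m.toNat
decreasing_by
  have hm : 0 < m := by omega
  have h1 : 0 ≤ PySem.Int.mod a m := PySem.Int.mod_nonneg a hm
  have h2 : PySem.Int.mod a m < m := PySem.Int.mod_lt a hm
  simp only [ra] at hra ⊢
  omega

-- _le_seg of Source B: the subinterval of [lo, hi) on which a*q + b <= C
def pvLeSeg (a b C lo hi : Int) : Int × Int :=
  if hi ≤ lo then (lo, lo)
  else if a = 0 then (if b ≤ C then (lo, hi) else (lo, lo))
  else if 0 < a then (lo, min hi (max lo (PySem.Int.floordiv (C - b) a + 1)))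
  else (max lo (min hi (-(PySem.Int.floordiv (C - b) (-a)))), hi)

-- _seg_len of Source B
def pvSegLen (a b C lo hi : Int) : Int :=
  let p := pvLeSeg a b C lo hi
  p.2 - p.1

-- _FS of Source B
def pvFS (a m l h b : Int) : Int := pvFloorSum (h - l) a (b + a * l) m

-- _clamp_sum of Source B
def pvClampSum (a m c l h : Int) : Int := (h - l) * c - pvFS a m l h 0

-- _cnt_ne_c of Source B
def pvCntNeC (a m c l h : Int) : Int :=
  (h - l) - (pvSegLen a 0 ((c + 1) * m - 1) l h - pvSegLen a 0 (c * m - 1) l h)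

def compute_formula_prediction_alt (P_l3 : Int) (Q_l3 : Int) (C_l3 : Int) (K_l3 : Int) (R_l2 : Int) (P_buffer : Int) (Q_buffer : Int) (S : Int) (block_h : Int) (block_w : Int) (H_in : Int) (W_in : Int) : Int :=
  let num_w_blocks := -(PySem.Int.floordiv (-W_in) block_w)
  let c := num_w_blocks - 1
  let n := max Q_l3 0
  let m := if block_w > 0 then block_w else -block_w
  let a := if block_w > 0 then Q_buffer else -Q_buffer
  let be := if block_w > 0 then Q_buffer + S - 2 else -(Q_buffer + S - 2)
  let C0 := (c + 1) * m - 1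
  let u := pvLeSeg a be C0 0 n
  let ul := u.1
  let uh := u.2
  let sum1 := (pvFS a m ul uh be - pvFS a m ul uh 0)
      + pvClampSum a m c 0 ul + pvClampSum a m c uh n
  let k0 := PySem.Int.floordiv be m
  let lenu := uh - ul
  let top := (pvFS a m ul uh be - pvFS a m ul uh 0) - lenu * k0
  let cnt1u := if k0 ≥ 1 then lenu else if k0 = 0 then top else 0
  let cnt1 := cnt1u + pvSegLen a 0 (c * m - 1) 0 ul + pvSegLen a 0 (c * m - 1) uh n
  let bg := be - a
  let n2 := max n 1
  let v := pvLeSeg a bg C0 1 n2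
  let vl := v.1
  let vh := v.2
  let k1 := PySem.Int.floordiv bg m
  let lenv := vh - vl
  let topv := (pvFS a m vl vh bg - pvFS a m vl vh 0) - lenv * k1
  let zeros := if k1 = 0 then lenv - topv else if k1 = -1 then topv else 0
  let cnt2 := (lenv - zeros) + pvCntNeC a m c 1 vl + pvCntNeC a m c vh n2
  let prck := P_l3 * R_l2 * C_l3 * K_l3
  sum1 * prck
    + cnt1 * P_l3 * (R_l2 - 1) * C_l3 * K_l3
    + (P_l3 - 1) * C_l3 * K_l3
    + cnt2 * prck
    + (C_l3 - 1) * K_l3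
    + (K_l3 - 1)

-- ===== PRECONDITION & SPEC =====
-- Pre_ excludes exactly block_h = 0 and block_w = 0, where A raises ZeroDivisionError.
def Pre_compute_formula_prediction (P_l3 : Int) (Q_l3 : Int) (C_l3 : Int) (K_l3 : Int) (R_l2 : Int) (P_buffer : Int) (Q_buffer : Int) (S : Int) (block_h : Int) (block_w : Int) (H_in : Int) (W_in : Int) : Prop :=
  block_h ≠ 0 ∧ block_w ≠ 0
instance (P_l3 : Int) (Q_l3 : Int) (C_l3 : Int) (K_l3 : Int) (R_l2 : Int) (P_buffer : Int) (Q_buffer : Int) (S : Int) (block_h : Int) (block_w : Int) (H_in : Int) (W_in : Int) : Decidable (Pre_compute_formula_prediction P_l3 Q_l3 C_l3 K_l3 R_l2 P_buffer Q_buffer S block_h block_w H_in W_in) := by unfold Pre_compute_formula_prediction; infer_instance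

def pvWitness_compute_formula_prediction : Int × Int × Int × Int × Int × Int × Int × Int × Int × Int × Int × Int := (2, 3, 2, 2, 2, 1, 2, 3, 2, 2, 7, 7)

def Spec_compute_formula_prediction (P_l3 : Int) (Q_l3 : Int) (C_l3 : Int) (K_l3 : Int) (R_l2 : Int) (P_buffer : Int) (Q_buffer : Int) (S : Int) (block_h : Int) (block_w : Int) (H_in : Int) (W_in : Int) (out : Int) : Prop := out = compute_formula_prediction_alt P_l3 Q_l3 C_l3 K_l3 R_l2 P_buffer Q_buffer S block_h block_w H_in W_in
instance (P_l3 : Int) (Q_l3 : Int) (C_l3 : Int) (K_l3 : Int) (R_l2 : Int) (P_buffer : Int) (Q_buffer : Int) (S : Int) (block_h : Int) (block_w : Int) (H_in : Int) (W_in : Int) (out : Int) : Decidable (Spec_compute_formula_prediction P_l3 Q_l3 C_l3 K_l3 R_l2 P_buffer Q_buffer S block_h block_w H_in W_in out) := by unfold Spec_compute_formula_prediction; infer_instance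

-- ===== CLAIM (what is proved, stated in full; the proofs are below) =====
def Claim_equal_compute_formula_prediction : Prop := ∀ (P_l3 : Int) (Q_l3 : Int) (C_l3 : Int) (K_l3 : Int) (R_l2 : Int) (P_buffer : Int) (Q_buffer : Int) (S : Int) (block_h : Int) (block_w : Int) (H_in : Int) (W_in : Int), Dom_compute_formula_prediction P_l3 Q_l3 C_l3 K_l3 R_l2 P_buffer Q_buffer S block_h block_w H_in W_in → Pre_compute_formula_prediction P_l3 Q_l3 C_l3 K_l3 R_l2 P_buffer Q_buffer S block_h block_w H_in W_in → Spec_compute_formula_prediction P_l3 Q_l3 C_l3 K_l3 R_l2 P_buffer Q_buffer S block_h block_w H_in W_in (compute_formula_prediction P_l3 Q_l3 C_l3 K_l3 R_l2 P_buffer Q_buffer S block_h block_w H_in W_in)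

-- ===== LEMMAS AND PROOFS =====
def ISum (l h : Int) (f : Int → Int) : Int := ∑ i ∈ Finset.range (h - l).toNat, f (l + i)

theorem ISum_zero_anchor (n : Int) (f : Int → Int) :
    ISum 0 n f = ∑ i ∈ Finset.range n.toNat, f i := by
  unfold ISum
  simp

-- count of j < Y with (j:Int) < v
theorem count_lt (Y : Nat) (v : Int) (hv : 0 ≤ v) :
    ∑ j ∈ Finset.range Y, (if (j : Int) < v then (1 : Int) else 0) = min v Y := by
  induction Y with
  | zero => simp; omega
  | succ Y ih =>
    rw [Finset.sum_range_succ, ih]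
    by_cases h : (Y : Int) < v
    · rw [if_pos h]
      push_cast
      omega
    · rw [if_neg h]
      push_cast
      omega

theorem count_ge (N : Nat) (t : Int) (ht : 0 ≤ t) :
    ∑ i ∈ Finset.range N, (if t ≤ (i : Int) then (1 : Int) else 0) = N - min t N := by
  induction N with
  | zero => simp; omega
  | succ N ih =>
    rw [Finset.sum_range_succ, ih]
    by_cases h : t ≤ (N : Int)
    · rw [if_pos h]; push_cast; omega
    · rw [if_neg h]; push_cast; omega

-- fdiv basics under 0 < m
theorem fdiv_nonneg (x m : Int) (hm : 0 < m) (hx : 0 ≤ x) : 0 ≤ PySem.Int.floordiv x m := by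
  rw [PySem.Int.floordiv_eq_ediv_of_pos hm]
  exact Int.ediv_nonneg hx (by omega)

theorem fdiv_mono (x y m : Int) (hm : 0 < m) (hxy : x ≤ y) :
    PySem.Int.floordiv x m ≤ PySem.Int.floordiv y m := by
  rw [PySem.Int.floordiv_eq_ediv_of_pos hm, PySem.Int.floordiv_eq_ediv_of_pos hm]
  exact Int.ediv_le_ediv hm hxy

theorem fdiv_add_mul (x k m : Int) (hm : 0 < m) :
    PySem.Int.floordiv (x + k * m) m = PySem.Int.floordiv x m + k := by
  rw [PySem.Int.floordiv_eq_ediv_of_pos hm, PySem.Int.floordiv_eq_ediv_of_pos hm]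
  exact Int.add_mul_ediv_right x k (by omega)

theorem fdiv_small (x m : Int) (hm : 0 < m) (h0 : 0 ≤ x) (h1 : x < m) :
    PySem.Int.floordiv x m = 0 := by
  rw [PySem.Int.floordiv_eq_ediv_of_pos hm]
  exact Int.ediv_eq_zero_of_lt h0 h1

-- the lattice-point swap
theorem swap_lemma (m ra rb n : Int) (hm : 0 < m) (hra0 : 0 < ra) (hram : ra < m)
    (hrb0 : 0 ≤ rb) (hrbm : rb < m) (hn : 0 < n)
    (hy : 0 < PySem.Int.floordiv (ra * (n - 1) + rb) m) :
    ISum 0 n (fun q => PySem.Int.floordiv (ra * q + rb) m) =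
      n * PySem.Int.floordiv (ra * (n - 1) + rb) m -
        ISum 0 (PySem.Int.floordiv (ra * (n - 1) + rb) m)
          (fun j => PySem.Int.floordiv (m * j + (m + ra - rb - 1)) ra) := by
  set y := PySem.Int.floordiv (ra * (n - 1) + rb) m with hydef
  rw [ISum_zero_anchor, ISum_zero_anchor]
  have hNn : (n.toNat : Int) = n := by omega
  have hYy : (y.toNat : Int) = y := by omega
  have hym : y * m ≤ ra * (n - 1) + rb := by
    rw [hydef]
    exact (PySem.Int.le_floordiv_iff_mul_le hm).mp (le_refl _)
  -- per-i: term = count over j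
  have step1 : ∀ i ∈ Finset.range n.toNat,
      PySem.Int.floordiv (ra * i + rb) m =
        ∑ j ∈ Finset.range y.toNat, (if ((j : Int) + 1) * m ≤ ra * i + rb then (1 : Int) else 0) := by
    intro i hi
    have hv0 : 0 ≤ PySem.Int.floordiv (ra * i + rb) m :=
      fdiv_nonneg _ _ hm (by positivity)
    have hvy : PySem.Int.floordiv (ra * i + rb) m ≤ y := by
      rw [hydef]
      apply fdiv_mono _ _ _ hm
      rw [Finset.mem_range] at hi
      have : (i : Int) ≤ n - 1 := by omega
      nlinarith
    have hcond : ∀ j : Nat, (((j : Int) + 1) * m ≤ ra * i + rb) ↔ ((j : Int) < PySem.Int.floordiv (ra * i + rb) m) := by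
      intro j
      rw [show ((j:Int) < PySem.Int.floordiv (ra * i + rb) m) ↔ ((j:Int) + 1 ≤ PySem.Int.floordiv (ra * i + rb) m) by omega,
        PySem.Int.le_floordiv_iff_mul_le hm]
    calc PySem.Int.floordiv (ra * i + rb) m
        = min (PySem.Int.floordiv (ra * i + rb) m) (y.toNat : Int) := by omega
      _ = ∑ j ∈ Finset.range y.toNat, (if (j : Int) < PySem.Int.floordiv (ra * i + rb) m then (1 : Int) else 0) := (count_lt _ _ hv0).symm
      _ = _ := by
          refine Finset.sum_congr rfl fun j _ => ?_
          rw [if_congr (hcond j) rfl rfl]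
  rw [Finset.sum_congr rfl step1, Finset.sum_comm]
  -- per-j: inner count = n - t_j
  have step2 : ∀ j ∈ Finset.range y.toNat,
      (∑ i ∈ Finset.range n.toNat, if ((j : Int) + 1) * m ≤ ra * i + rb then (1 : Int) else 0) =
        n - PySem.Int.floordiv (m * j + (m + ra - rb - 1)) ra := by
    intro j hj
    rw [Finset.mem_range] at hj
    set t := PySem.Int.floordiv (m * j + (m + ra - rb - 1)) ra with htdef
    have ht0 : 0 ≤ t := fdiv_nonneg _ _ hra0 (by nlinarith [Int.natCast_nonneg j])
    have htn : t ≤ n := by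
      have hj1 : (j : Int) + 1 ≤ y := by omega
      have hXle : m * j + (m + ra - rb - 1) < ra * n := by nlinarith
      have := (PySem.Int.floordiv_lt_iff_lt_mul (a := m * j + (m + ra - rb - 1)) (q := n) hra0).mpr (by nlinarith)
      omega
    have hcond : ∀ i : Nat, (((j : Int) + 1) * m ≤ ra * i + rb) ↔ (t ≤ (i : Int)) := by
      intro i
      constructor
      · intro h
        by_contra hlt
        push_neg at hlt
        have : t ≤ (i : Int) := by
          rw [htdef]
          have : PySem.Int.floordiv (m * j + (m + ra - rb - 1)) ra < (i : Int) + 1 := by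
            rw [PySem.Int.floordiv_lt_iff_lt_mul hra0]
            nlinarith
          omega
        omega
      · intro h
        have : PySem.Int.floordiv (m * j + (m + ra - rb - 1)) ra < (i : Int) + 1 := by omega
        rw [PySem.Int.floordiv_lt_iff_lt_mul hra0] at this
        nlinarith
    calc (∑ i ∈ Finset.range n.toNat, if ((j : Int) + 1) * m ≤ ra * i + rb then (1 : Int) else 0)
        = ∑ i ∈ Finset.range n.toNat, (if t ≤ (i : Int) then (1 : Int) else 0) := by
          refine Finset.sum_congr rfl fun i _ => ?_
          rw [if_congr (hcond i) rfl rfl]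
      _ = (n.toNat : Int) - min t n.toNat := count_ge _ _ ht0
      _ = n - t := by omega
  rw [Finset.sum_congr rfl step2, Finset.sum_sub_distrib, Finset.sum_const, Finset.card_range]
  simp only [nsmul_eq_mul]
  rw [hYy]
  ring


theorem ISum_nil (l h : Int) (f : Int → Int) (hle : h ≤ l) : ISum l h f = 0 := by
  unfold ISum
  have : (h - l).toNat = 0 := by omega
  simp [this]

theorem ISum_gauss (n : Int) (hn : 0 ≤ n) :
    ISum 0 n (fun q => q) = PySem.Int.floordiv (n * (n - 1)) 2 := by
  rw [ISum_zero_anchor]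
  have key : ∀ N : Nat, (∑ i ∈ Finset.range N, (i : Int)) * 2 = (N : Int) * ((N : Int) - 1) := by
    intro N
    induction N with
    | zero => simp
    | succ N ih =>
      rw [Finset.sum_range_succ, add_mul, ih]
      push_cast
      ring
  have h1 : n * (n - 1) = (∑ i ∈ Finset.range n.toNat, (i : Int)) * 2 := by
    rw [key n.toNat]
    have : ((n.toNat : Nat) : Int) = n := by omega
    rw [this]
  rw [h1, PySem.Int.floordiv_eq_ediv_of_pos (by norm_num : (0:Int) < 2),
    Int.mul_ediv_cancel _ (by norm_num)]

theorem pvFloorSum_spec_aux : ∀ (K : Nat) (m : Int), m.toNat ≤ K → 0 < m → ∀ (n a b : Int),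
    pvFloorSum n a b m = ISum 0 n (fun q => PySem.Int.floordiv (a * q + b) m) := by
  intro K
  induction K with
  | zero => intro m hK hm; omega
  | succ K ih =>
    intro m hK hm n a b
    by_cases hn : n ≤ 0
    · rw [pvFloorSum, dif_pos (Or.inl hn)]
      exact (ISum_nil _ _ _ hn).symm
    · push_neg at hn
      rw [pvFloorSum, dif_neg (by omega)]
      simp only []
      set qa := PySem.Int.floordiv a m with hqa
      set ra := PySem.Int.mod a m with hra
      set qb := PySem.Int.floordiv b m with hqb
      set rb := PySem.Int.mod b m with hrb
      have ha : qa * m + ra = a := PySem.Int.floordiv_mul_add_mod a m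
      have hb : qb * m + rb = b := PySem.Int.floordiv_mul_add_mod b m
      have hra0 : 0 ≤ ra := PySem.Int.mod_nonneg a hm
      have hram : ra < m := PySem.Int.mod_lt a hm
      have hrb0 : 0 ≤ rb := PySem.Int.mod_nonneg b hm
      have hrbm : rb < m := PySem.Int.mod_lt b hm
      -- mod reduction of the sum
      have main : ISum 0 n (fun q => PySem.Int.floordiv (a * q + b) m) =
          qa * PySem.Int.floordiv (n * (n - 1)) 2 + qb * n +
            ISum 0 n (fun q => PySem.Int.floordiv (ra * q + rb) m) := by
        have hpt : ∀ q : Int, PySem.Int.floordiv (a * q + b) m =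
            PySem.Int.floordiv (ra * q + rb) m + (qa * q + qb) := by
          intro q
          have harg : a * q + b = (ra * q + rb) + (qa * q + qb) * m := by
            rw [← ha, ← hb]; ring
          rw [harg, fdiv_add_mul _ _ _ hm]
        have hpt' : ∀ i ∈ Finset.range n.toNat, PySem.Int.floordiv (a * (i:Int) + b) m =
            PySem.Int.floordiv (ra * (i:Int) + rb) m + (qa * (i:Int) + qb) := fun i _ => hpt i
        rw [ISum_zero_anchor, ISum_zero_anchor]
        rw [Finset.sum_congr rfl hpt']
        rw [Finset.sum_add_distrib, Finset.sum_add_distrib, Finset.sum_const, Finset.card_range]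
        have hgauss : ∑ i ∈ Finset.range n.toNat, (qa * (i : Int)) =
            qa * PySem.Int.floordiv (n * (n - 1)) 2 := by
          rw [← Finset.mul_sum]
          congr 1
          have := ISum_gauss n (by omega)
          rw [ISum_zero_anchor] at this
          simpa using this
        rw [hgauss]
        simp only [nsmul_eq_mul]
        have : ((n.toNat : Nat) : Int) = n := by omega
        rw [this]
        ring
      rw [main]
      by_cases hraz : ra = 0
      · rw [dif_pos hraz]
        have : ISum 0 n (fun q => PySem.Int.floordiv (ra * q + rb) m) = 0 := by
          rw [ISum_zero_anchor]
          refine Finset.sum_eq_zero fun i _ => ?_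
          rw [hraz]
          simpa using fdiv_small rb m hm hrb0 hrbm
        rw [this]
        ring
      · rw [dif_neg hraz]
        have hra0' : 0 < ra := by omega
        set y := PySem.Int.floordiv (ra * (n - 1) + rb) m with hy
        by_cases hyz : y ≤ 0
        · rw [if_pos hyz]
          have : ISum 0 n (fun q => PySem.Int.floordiv (ra * q + rb) m) = 0 := by
            rw [ISum_zero_anchor]
            refine Finset.sum_eq_zero fun i hi => ?_
            rw [Finset.mem_range] at hi
            have h0 : 0 ≤ PySem.Int.floordiv (ra * i + rb) m :=
              fdiv_nonneg _ _ hm (by positivity)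
            have h1 : PySem.Int.floordiv (ra * i + rb) m ≤ y := by
              rw [hy]
              apply fdiv_mono _ _ _ hm
              have : (i : Int) ≤ n - 1 := by omega
              nlinarith
            omega
          rw [this]
          ring
        · rw [if_neg hyz]
          push_neg at hyz
          rw [swap_lemma m ra rb n hm hra0' hram hrb0 hrbm hn (by rw [← hy]; omega)]
          rw [← hy]
          have hihy : pvFloorSum y m (m + ra - rb - 1) ra =
              ISum 0 y (fun q => PySem.Int.floordiv (m * q + (m + ra - rb - 1)) ra) := by
            apply ih ra (by omega) hra0'
          rw [hihy]
          ring

theorem pvFloorSum_spec' (m : Int) (hm : 0 < m) (n a b : Int) :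
    pvFloorSum n a b m = ISum 0 n (fun q => PySem.Int.floordiv (a * q + b) m) :=
  pvFloorSum_spec_aux m.toNat m (le_refl _) hm n a b

theorem ISum_anchor (l h : Int) (g : Int → Int) :
    ISum l h g = ISum 0 (h - l) (fun q => g (l + q)) := by
  unfold ISum
  simp only [sub_zero, zero_add]

theorem pvFS_spec' (a m l h b : Int) (hm : 0 < m) :
    pvFS a m l h b = ISum l h (fun q => PySem.Int.floordiv (a * q + b) m) := by
  rw [pvFS, pvFloorSum_spec' m hm, ISum_anchor l h]
  unfold ISum
  refine Finset.sum_congr rfl fun i _ => ?_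
  congr 1
  ring

theorem ISum_split (l mid h : Int) (f : Int → Int) (h1 : l ≤ mid) (h2 : mid ≤ h) :
    ISum l h f = ISum l mid f + ISum mid h f := by
  unfold ISum
  have hh : (h - l).toNat = (mid - l).toNat + (h - mid).toNat := by omega
  rw [hh, Finset.sum_range_add]
  congr 1
  refine Finset.sum_congr rfl fun i hi => ?_
  congr 1
  omega


theorem pvLeSeg_spec (a b C lo hi : Int) (hlh : lo ≤ hi) :
    lo ≤ (pvLeSeg a b C lo hi).1 ∧ (pvLeSeg a b C lo hi).1 ≤ (pvLeSeg a b C lo hi).2 ∧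
    (pvLeSeg a b C lo hi).2 ≤ hi ∧
    (∀ q, (pvLeSeg a b C lo hi).1 ≤ q → q < (pvLeSeg a b C lo hi).2 → a * q + b ≤ C) ∧
    (∀ q, lo ≤ q → q < hi → a * q + b ≤ C → (pvLeSeg a b C lo hi).1 ≤ q ∧ q < (pvLeSeg a b C lo hi).2) := by
  unfold pvLeSeg
  split_ifs with hle h0 hb hpos
  · exact ⟨le_refl _, le_refl _, by omega, fun q hq1 hq2 => by omega, fun q hq1 hq2 _ => by omega⟩
  · subst h0
    exact ⟨le_refl _, by simp; omega, by simp, fun q hq1 hq2 => by simpa using hb,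
      fun q hq1 hq2 hc => by simp; omega⟩
  · subst h0
    exact ⟨le_refl _, le_refl _, by omega, fun q hq1 hq2 => by omega,
      fun q hq1 hq2 hc => by simp at hc; omega⟩
  · -- 0 < a
    have key : ∀ q : Int, q ≤ PySem.Int.floordiv (C - b) a ↔ a * q + b ≤ C := by
      intro q
      rw [PySem.Int.le_floordiv_iff_mul_le hpos]
      constructor <;> intro h <;> nlinarith [h]
    refine ⟨le_refl _, ?_, by simp, fun q hq1 hq2 => ?_, fun q hq1 hq2 hc => ?_⟩
    · simp; omega
    · have := (key q).mp (by simp at hq2; omega)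
      exact this
    · have := (key q).mpr hc
      simp; omega
  · -- a < 0
    have hneg : 0 < -a := by omega
    have key : ∀ q : Int, -(PySem.Int.floordiv (C - b) (-a)) ≤ q ↔ a * q + b ≤ C := by
      intro q
      have : -(PySem.Int.floordiv (C - b) (-a)) ≤ q ↔ -q ≤ PySem.Int.floordiv (C - b) (-a) := by omega
      rw [this, PySem.Int.le_floordiv_iff_mul_le hneg]
      constructor <;> intro h <;> nlinarith [h]
    refine ⟨by simp, ?_, le_refl _, fun q hq1 hq2 => ?_, fun q hq1 hq2 hc => ?_⟩
    · simp; omega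
    · exact (key q).mp (by simp at hq1; omega)
    · have := (key q).mpr hc
      simp; omega

theorem ISum_congr (l h : Int) (f g : Int → Int)
    (hfg : ∀ q, l ≤ q → q < h → f q = g q) : ISum l h f = ISum l h g := by
  unfold ISum
  refine Finset.sum_congr rfl fun i hi => ?_
  rw [Finset.mem_range] at hi
  exact hfg _ (by omega) (by omega)

theorem ISum_const (l h k : Int) (hlh : l ≤ h) : ISum l h (fun _ => k) = (h - l) * k := by
  unfold ISum
  rw [Finset.sum_const, Finset.card_range]
  simp only [nsmul_eq_mul]
  have : ((h - l).toNat : Int) = h - l := by omega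
  rw [this]

theorem ISum_sub (l h : Int) (f g : Int → Int) :
    ISum l h (fun q => f q - g q) = ISum l h f - ISum l h g := by
  unfold ISum; rw [Finset.sum_sub_distrib]

theorem ISum_max (l h : Int) (f : Int → Int) : ISum l (max h l) f = ISum l h f := by
  unfold ISum
  have : (max h l - l).toNat = (h - l).toNat := by omega
  rw [this]

-- indicator sum of a linear condition over [l, h) = segment length
theorem ISum_ind_le (a b C l h : Int) (hlh : l ≤ h) :
    ISum l h (fun q => if a * q + b ≤ C then (1 : Int) else 0) = pvSegLen a b C l h := by
  obtain ⟨h1, h2, h3, hfwd, hcomp⟩ := pvLeSeg_spec a b C l h hlh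
  rw [ISum_split l (pvLeSeg a b C l h).1 h _ h1 (by omega),
    ISum_split (pvLeSeg a b C l h).1 (pvLeSeg a b C l h).2 h _ h2 h3]
  have e1 : ISum l (pvLeSeg a b C l h).1 (fun q => if a * q + b ≤ C then (1 : Int) else 0) = 0 := by
    rw [ISum_congr _ _ _ (fun _ => (0:Int)) ?_, ISum_const _ _ _ h1]
    · ring
    · intro q hq1 hq2
      rw [if_neg]
      intro hc
      exact absurd ((hcomp q (by omega) (by omega) hc).1) (by omega)
  have e2 : ISum (pvLeSeg a b C l h).1 (pvLeSeg a b C l h).2 (fun q => if a * q + b ≤ C then (1 : Int) else 0)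
      = (pvLeSeg a b C l h).2 - (pvLeSeg a b C l h).1 := by
    rw [ISum_congr _ _ _ (fun _ => (1:Int)) ?_, ISum_const _ _ _ h2]
    · ring
    · intro q hq1 hq2
      rw [if_pos (hfwd q hq1 hq2)]
  have e3 : ISum (pvLeSeg a b C l h).2 h (fun q => if a * q + b ≤ C then (1 : Int) else 0) = 0 := by
    rw [ISum_congr _ _ _ (fun _ => (0:Int)) ?_, ISum_const _ _ _ h3]
    · ring
    · intro q hq1 hq2
      rw [if_neg]
      intro hc
      exact absurd ((hcomp q (by omega) (by omega) hc).2) (by omega)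
  rw [e1, e2, e3, pvSegLen]
  ring

-- floordiv of a shifted numerator: the difference is fdiv d m or fdiv d m + 1
theorem fdiv_two_val (m x d : Int) (hm : 0 < m) :
    PySem.Int.floordiv d m ≤ PySem.Int.floordiv (x + d) m - PySem.Int.floordiv x m ∧
    PySem.Int.floordiv (x + d) m - PySem.Int.floordiv x m ≤ PySem.Int.floordiv d m + 1 := by
  have hx := PySem.Int.floordiv_mul_add_mod x m
  have hd := PySem.Int.floordiv_mul_add_mod d m
  have hxd := PySem.Int.floordiv_mul_add_mod (x + d) m
  have hx0 := PySem.Int.mod_nonneg x hm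
  have hx1 := PySem.Int.mod_lt x hm
  have hd0 := PySem.Int.mod_nonneg d hm
  have hd1 := PySem.Int.mod_lt d hm
  have hxd0 := PySem.Int.mod_nonneg (x + d) hm
  have hxd1 := PySem.Int.mod_lt (x + d) hm
  set u := PySem.Int.floordiv x m
  set v := PySem.Int.floordiv d m
  set w := PySem.Int.floordiv (x + d) m
  have key : (w - u - v) * m = PySem.Int.mod x m + PySem.Int.mod d m - PySem.Int.mod (x + d) m := by
    nlinarith [hx, hd, hxd]
  constructor
  · -- v ≤ w - u
    by_contra hlt
    push_neg at hlt
    have h1 : w - u - v ≤ -1 := by omega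
    have : (w - u - v) * m ≤ (-1) * m := by
      apply mul_le_mul_of_nonneg_right h1 (by omega)
    omega
  · by_contra hlt
    push_neg at hlt
    have h1 : (2:Int) ≤ w - u - v := by omega
    have : (2:Int) * m ≤ (w - u - v) * m := by
      apply mul_le_mul_of_nonneg_right h1 (by omega)
    omega


theorem fdiv_le_iff (X m c : Int) (hm : 0 < m) :
    PySem.Int.floordiv X m ≤ c ↔ X ≤ (c + 1) * m - 1 := by
  rw [show (PySem.Int.floordiv X m ≤ c) ↔ (PySem.Int.floordiv X m < c + 1) by omega,
    PySem.Int.floordiv_lt_iff_lt_mul hm]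
  omega

theorem pvFS0_spec (a m l h : Int) (hm : 0 < m) :
    pvFS a m l h 0 = ISum l h (fun q => PySem.Int.floordiv (a * q) m) := by
  rw [pvFS_spec' a m l h 0 hm]
  exact ISum_congr _ _ _ _ fun q _ _ => by rw [add_zero]

-- sum over a clamped piece
theorem clamp_piece (a m be c l h : Int) (hm : 0 < m) (hlh : l ≤ h)
    (hgt : ∀ q, l ≤ q → q < h → ¬(a * q + be ≤ (c + 1) * m - 1)) :
    ISum l h (fun q => min (PySem.Int.floordiv (a * q + be) m) c - PySem.Int.floordiv (a * q) m)
      = pvClampSum a m c l h := by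
  rw [pvClampSum, pvFS0_spec a m l h hm, ← ISum_const l h c hlh, ← ISum_sub]
  refine ISum_congr _ _ _ _ fun q h1 h2 => ?_
  have hne := hgt q h1 h2
  rw [← fdiv_le_iff _ _ _ hm] at hne
  rw [min_eq_right (by omega)]

theorem piece_sum1 (m a be c n ul uh : Int) (hm : 0 < m) (hn : 0 ≤ n)
    (hu : pvLeSeg a be ((c + 1) * m - 1) 0 n = (ul, uh)) :
    (pvFS a m ul uh be - pvFS a m ul uh 0) + pvClampSum a m c 0 ul + pvClampSum a m c uh n
      = ISum 0 n (fun q => min (PySem.Int.floordiv (a * q + be) m) c - PySem.Int.floordiv (a * q) m) := by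
  have hspec := pvLeSeg_spec a be ((c + 1) * m - 1) 0 n hn
  rw [hu] at hspec
  obtain ⟨h1, h2, h3, hfwd, hcomp⟩ := hspec
  simp only at h1 h2 h3 hfwd hcomp
  rw [ISum_split 0 ul n _ h1 (by omega), ISum_split ul uh n _ h2 h3]
  have e1 : ISum 0 ul (fun q => min (PySem.Int.floordiv (a * q + be) m) c - PySem.Int.floordiv (a * q) m)
      = pvClampSum a m c 0 ul := by
    refine clamp_piece a m be c 0 ul hm h1 fun q hq1 hq2 hc => ?_
    exact absurd ((hcomp q (by omega) (by omega) hc).1) (by omega)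
  have e3 : ISum uh n (fun q => min (PySem.Int.floordiv (a * q + be) m) c - PySem.Int.floordiv (a * q) m)
      = pvClampSum a m c uh n := by
    refine clamp_piece a m be c uh n hm h3 fun q hq1 hq2 hc => ?_
    exact absurd ((hcomp q (by omega) (by omega) hc).2) (by omega)
  have e2 : ISum ul uh (fun q => min (PySem.Int.floordiv (a * q + be) m) c - PySem.Int.floordiv (a * q) m)
      = pvFS a m ul uh be - pvFS a m ul uh 0 := by
    rw [pvFS_spec' a m ul uh be hm, pvFS0_spec a m ul uh hm, ← ISum_sub]
    refine ISum_congr _ _ _ _ fun q hq1 hq2 => ?_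
    have hc := hfwd q hq1 hq2
    rw [← fdiv_le_iff _ _ _ hm] at hc
    rw [min_eq_left hc]
  rw [e1, e2, e3]
  ring

-- count over a clamped piece: min(e,c)=c there, so count (a*q)//m < c
theorem clamp_cnt1 (a m be c l h : Int) (hm : 0 < m) (hlh : l ≤ h)
    (hgt : ∀ q, l ≤ q → q < h → ¬(a * q + be ≤ (c + 1) * m - 1)) :
    ISum l h (fun q => if PySem.Int.floordiv (a * q) m < min (PySem.Int.floordiv (a * q + be) m) c then (1:Int) else 0)
      = pvSegLen a 0 (c * m - 1) l h := by
  rw [← ISum_ind_le a 0 (c * m - 1) l h hlh]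
  refine ISum_congr _ _ _ _ fun q h1 h2 => ?_
  have hne := hgt q h1 h2
  rw [← fdiv_le_iff _ _ _ hm] at hne
  rw [min_eq_right (by omega)]
  refine if_congr ?_ rfl rfl
  rw [show (PySem.Int.floordiv (a * q) m < c) ↔ (PySem.Int.floordiv (a * q) m ≤ c - 1) by omega,
    fdiv_le_iff _ _ _ hm, show (c - 1 + 1) * m - 1 = c * m - 1 by ring]
  omega

theorem piece_cnt1 (m a be c n ul uh : Int) (hm : 0 < m) (hn : 0 ≤ n)
    (hu : pvLeSeg a be ((c + 1) * m - 1) 0 n = (ul, uh)) :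
    (if PySem.Int.floordiv be m ≥ 1 then uh - ul
     else if PySem.Int.floordiv be m = 0 then (pvFS a m ul uh be - pvFS a m ul uh 0) - (uh - ul) * PySem.Int.floordiv be m
     else 0)
      + pvSegLen a 0 (c * m - 1) 0 ul + pvSegLen a 0 (c * m - 1) uh n
    = ISum 0 n (fun q => if PySem.Int.floordiv (a * q) m < min (PySem.Int.floordiv (a * q + be) m) c then (1:Int) else 0) := by
  have hspec := pvLeSeg_spec a be ((c + 1) * m - 1) 0 n hn
  rw [hu] at hspec
  obtain ⟨h1, h2, h3, hfwd, hcomp⟩ := hspec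
  simp only at h1 h2 h3 hfwd hcomp
  rw [ISum_split 0 ul n _ h1 (by omega), ISum_split ul uh n _ h2 h3]
  have e1 := clamp_cnt1 a m be c 0 ul hm h1 fun q hq1 hq2 hc =>
    absurd ((hcomp q (by omega) (by omega) hc).1) (by omega)
  have e3 := clamp_cnt1 a m be c uh n hm h3 fun q hq1 hq2 hc =>
    absurd ((hcomp q (by omega) (by omega) hc).2) (by omega)
  have emid : ISum ul uh (fun q => if PySem.Int.floordiv (a * q) m < min (PySem.Int.floordiv (a * q + be) m) c then (1:Int) else 0)
      = ISum ul uh (fun q => if PySem.Int.floordiv (a * q) m < PySem.Int.floordiv (a * q + be) m then (1:Int) else 0) := by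
    refine ISum_congr _ _ _ _ fun q hq1 hq2 => ?_
    have hc := hfwd q hq1 hq2
    rw [← fdiv_le_iff _ _ _ hm] at hc
    rw [min_eq_left hc]
  have htv : ∀ q : Int, PySem.Int.floordiv be m ≤ PySem.Int.floordiv (a * q + be) m - PySem.Int.floordiv (a * q) m ∧
      PySem.Int.floordiv (a * q + be) m - PySem.Int.floordiv (a * q) m ≤ PySem.Int.floordiv be m + 1 :=
    fun q => fdiv_two_val m (a * q) be hm
  by_cases hk1 : PySem.Int.floordiv be m ≥ 1
  · rw [if_pos hk1, e1, e3, emid]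
    rw [ISum_congr ul uh _ (fun _ => (1:Int)) (fun q _ _ => by
      dsimp only
      have := htv q; rw [if_pos (by omega)]), ISum_const _ _ _ h2]
    ring
  · rw [if_neg hk1]
    by_cases hk0 : PySem.Int.floordiv be m = 0
    · rw [if_pos hk0, e1, e3, emid]
      rw [ISum_congr ul uh _ (fun q => PySem.Int.floordiv (a * q + be) m - PySem.Int.floordiv (a * q) m)
          (fun q _ _ => by
            dsimp only
            have := htv q
            split_ifs <;> omega),
        ISum_sub, ← pvFS_spec' a m ul uh be hm, ← pvFS0_spec a m ul uh hm, hk0]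
      ring
    · rw [if_neg hk0, e1, e3, emid]
      rw [ISum_congr ul uh _ (fun _ => (0:Int)) (fun q _ _ => by
        dsimp only
        have := htv q; rw [if_neg (by omega)]), ISum_const _ _ _ h2]
      ring

-- count of (a*q)//m ≠ c over a clamped piece
theorem clamp_cnt2 (a m bg c l h : Int) (hm : 0 < m) (hlh : l ≤ h)
    (hgt : ∀ q, l ≤ q → q < h → ¬(a * q + bg ≤ (c + 1) * m - 1)) :
    ISum l h (fun q => if min (PySem.Int.floordiv (a * q + bg) m) c ≠ PySem.Int.floordiv (a * q) m then (1:Int) else 0)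
      = pvCntNeC a m c l h := by
  have main : ISum l h (fun q => if min (PySem.Int.floordiv (a * q + bg) m) c ≠ PySem.Int.floordiv (a * q) m then (1:Int) else 0)
      = ISum l h (fun q => (fun _ : Int => (1:Int)) q -
          ((fun q => if a * q + 0 ≤ (c + 1) * m - 1 then (1:Int) else 0) q -
            (fun q => if a * q + 0 ≤ c * m - 1 then (1:Int) else 0) q)) := by
    refine ISum_congr _ _ _ _ fun q h1 h2 => ?_
    dsimp only
    have hne := hgt q h1 h2
    rw [← fdiv_le_iff _ _ _ hm] at hne
    rw [min_eq_right (by omega)]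
    have hc1 : (a * q + 0 ≤ (c + 1) * m - 1) ↔ PySem.Int.floordiv (a * q) m ≤ c := by
      rw [fdiv_le_iff _ _ _ hm]; omega
    have hc2 : (a * q + 0 ≤ c * m - 1) ↔ (PySem.Int.floordiv (a * q) m ≤ c - 1) := by
      rw [show c * m - 1 = (c - 1 + 1) * m - 1 by ring, fdiv_le_iff _ _ _ hm]; omega
    rw [if_congr hc1 rfl rfl, if_congr hc2 rfl rfl]
    have h3 : PySem.Int.floordiv (a * q) m ≤ c - 1 → PySem.Int.floordiv (a * q) m ≤ c := by omega
    split_ifs <;> omega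
  rw [main, ISum_sub, ISum_sub, ISum_const l h 1 hlh,
    ISum_ind_le a 0 ((c + 1) * m - 1) l h hlh, ISum_ind_le a 0 (c * m - 1) l h hlh, pvCntNeC]
  ring

theorem piece_cnt2 (m a bg c n2 vl vh : Int) (hm : 0 < m) (hn2 : 1 ≤ n2)
    (hv : pvLeSeg a bg ((c + 1) * m - 1) 1 n2 = (vl, vh)) :
    ((vh - vl) - (if PySem.Int.floordiv bg m = 0 then (vh - vl) - ((pvFS a m vl vh bg - pvFS a m vl vh 0) - (vh - vl) * PySem.Int.floordiv bg m)
                  else if PySem.Int.floordiv bg m = -1 then (pvFS a m vl vh bg - pvFS a m vl vh 0) - (vh - vl) * PySem.Int.floordiv bg m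
                  else 0))
      + pvCntNeC a m c 1 vl + pvCntNeC a m c vh n2
    = ISum 1 n2 (fun q => if min (PySem.Int.floordiv (a * q + bg) m) c ≠ PySem.Int.floordiv (a * q) m then (1:Int) else 0) := by
  have hspec := pvLeSeg_spec a bg ((c + 1) * m - 1) 1 n2 hn2
  rw [hv] at hspec
  obtain ⟨h1, h2, h3, hfwd, hcomp⟩ := hspec
  simp only at h1 h2 h3 hfwd hcomp
  rw [ISum_split 1 vl n2 _ h1 (by omega), ISum_split vl vh n2 _ h2 h3]
  have e1 := clamp_cnt2 a m bg c 1 vl hm h1 fun q hq1 hq2 hc =>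
    absurd ((hcomp q (by omega) (by omega) hc).1) (by omega)
  have e3 := clamp_cnt2 a m bg c vh n2 hm h3 fun q hq1 hq2 hc =>
    absurd ((hcomp q (by omega) (by omega) hc).2) (by omega)
  have emid : ISum vl vh (fun q => if min (PySem.Int.floordiv (a * q + bg) m) c ≠ PySem.Int.floordiv (a * q) m then (1:Int) else 0)
      = ISum vl vh (fun q => if PySem.Int.floordiv (a * q + bg) m ≠ PySem.Int.floordiv (a * q) m then (1:Int) else 0) := by
    refine ISum_congr _ _ _ _ fun q hq1 hq2 => ?_
    have hc := hfwd q hq1 hq2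
    rw [← fdiv_le_iff _ _ _ hm] at hc
    rw [min_eq_left hc]
  have htv : ∀ q : Int, PySem.Int.floordiv bg m ≤ PySem.Int.floordiv (a * q + bg) m - PySem.Int.floordiv (a * q) m ∧
      PySem.Int.floordiv (a * q + bg) m - PySem.Int.floordiv (a * q) m ≤ PySem.Int.floordiv bg m + 1 :=
    fun q => fdiv_two_val m (a * q) bg hm
  by_cases hk0 : PySem.Int.floordiv bg m = 0
  · rw [if_pos hk0, e1, e3, emid]
    rw [ISum_congr vl vh _ (fun q => PySem.Int.floordiv (a * q + bg) m - PySem.Int.floordiv (a * q) m)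
        (fun q _ _ => by
          dsimp only
          have := htv q
          split_ifs <;> omega),
      ISum_sub, ← pvFS_spec' a m vl vh bg hm, ← pvFS0_spec a m vl vh hm, hk0]
    ring
  · rw [if_neg hk0]
    by_cases hk1 : PySem.Int.floordiv bg m = -1
    · rw [if_pos hk1, e1, e3, emid]
      rw [ISum_congr vl vh _ (fun q => 0 - (PySem.Int.floordiv (a * q + bg) m - PySem.Int.floordiv (a * q) m))
          (fun q _ _ => by
            dsimp only
            have := htv q
            split_ifs <;> omega),
        ISum_sub, ISum_sub, ← pvFS_spec' a m vl vh bg hm, ← pvFS0_spec a m vl vh hm,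
        ISum_const _ _ _ h2, hk1]
      ring
    · rw [if_neg hk1, e1, e3, emid]
      rw [ISum_congr vl vh _ (fun _ => (1:Int)) (fun q _ _ => by
        dsimp only
        have := htv q; rw [if_pos (by omega)]), ISum_const _ _ _ h2]
      ring

theorem foldl_add_ISum (lo hi : Int) (g : Int → Int) (init : Int) :
    (PySem.List.pyRange lo hi 1).foldl (fun acc q => acc + g q) init = init + ISum lo hi g := by
  rw [PySem.List.pyRange_one, List.foldl_map, ISum]
  generalize (hi - lo).toNat = N
  induction N generalizing init with
  | zero => simp
  | succ N ih =>
    rw [List.range_succ, List.foldl_append, Finset.sum_range_succ, ih]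
    simp
    ring

theorem foldl_ite_ISum (lo hi : Int) (p : Int → Prop) [DecidablePred p] (init : Int) :
    (PySem.List.pyRange lo hi 1).foldl (fun acc q => if p q then acc + 1 else acc) init
      = init + ISum lo hi (fun q => if p q then 1 else 0) := by
  have hf : (fun (acc : Int) (q : Int) => if p q then acc + 1 else acc)
      = fun acc q => acc + (if p q then (1:Int) else 0) := by
    funext acc q; split_ifs <;> simp
  rw [hf, foldl_add_ISum]

theorem A_eq (P_l3 Q_l3 C_l3 K_l3 R_l2 P_buffer Q_buffer S block_h block_w H_in W_in : Int) :
    compute_formula_prediction P_l3 Q_l3 C_l3 K_l3 R_l2 P_buffer Q_buffer S block_h block_w H_in W_in =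
      (ISum 0 Q_l3 fun q => min (PySem.Int.floordiv (q * Q_buffer + Q_buffer + S - 2) block_w) (-(PySem.Int.floordiv (-W_in) block_w) - 1) - PySem.Int.floordiv (q * Q_buffer) block_w) * (P_l3 * R_l2 * C_l3 * K_l3)
      + (ISum 0 Q_l3 fun q => if PySem.Int.floordiv (q * Q_buffer) block_w < min (PySem.Int.floordiv (q * Q_buffer + Q_buffer + S - 2) block_w) (-(PySem.Int.floordiv (-W_in) block_w) - 1) then 1 else 0) * P_l3 * (R_l2 - 1) * C_l3 * K_l3
      + (P_l3 - 1) * C_l3 * K_l3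
      + (ISum 1 Q_l3 fun q => if min (PySem.Int.floordiv ((q - 1) * Q_buffer + Q_buffer + S - 2) block_w) (-(PySem.Int.floordiv (-W_in) block_w) - 1) ≠ PySem.Int.floordiv (q * Q_buffer) block_w then 1 else 0) * (P_l3 * R_l2 * C_l3 * K_l3)
      + (C_l3 - 1) * K_l3 + (K_l3 - 1) := by
  simp only [compute_formula_prediction]
  rw [foldl_ite_ISum 0 Q_l3 (fun q => min (PySem.Int.floordiv (q * Q_buffer + Q_buffer + S - 2) block_w) (-(PySem.Int.floordiv (-W_in) block_w) - 1) > PySem.Int.floordiv (q * Q_buffer) block_w) 0,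
    foldl_add_ISum 0 Q_l3 (fun q => min (PySem.Int.floordiv (q * Q_buffer + Q_buffer + S - 2) block_w) (-(PySem.Int.floordiv (-W_in) block_w) - 1) - PySem.Int.floordiv (q * Q_buffer) block_w) 0,
    foldl_ite_ISum 1 Q_l3 (fun q => min (PySem.Int.floordiv ((q - 1) * Q_buffer + Q_buffer + S - 2) block_w) (-(PySem.Int.floordiv (-W_in) block_w) - 1) ≠ PySem.Int.floordiv (q * Q_buffer) block_w) 0]
  simp only [zero_add, gt_iff_lt]

theorem B_eq (P_l3 Q_l3 C_l3 K_l3 R_l2 P_buffer Q_buffer S block_h block_w H_in W_in : Int)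
    (hbw : block_w ≠ 0) :
    compute_formula_prediction_alt P_l3 Q_l3 C_l3 K_l3 R_l2 P_buffer Q_buffer S block_h block_w H_in W_in =
      (ISum 0 Q_l3 fun q => min (PySem.Int.floordiv (q * Q_buffer + Q_buffer + S - 2) block_w) (-(PySem.Int.floordiv (-W_in) block_w) - 1) - PySem.Int.floordiv (q * Q_buffer) block_w) * (P_l3 * R_l2 * C_l3 * K_l3)
      + (ISum 0 Q_l3 fun q => if PySem.Int.floordiv (q * Q_buffer) block_w < min (PySem.Int.floordiv (q * Q_buffer + Q_buffer + S - 2) block_w) (-(PySem.Int.floordiv (-W_in) block_w) - 1) then 1 else 0) * P_l3 * (R_l2 - 1) * C_l3 * K_l3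
      + (P_l3 - 1) * C_l3 * K_l3
      + (ISum 1 Q_l3 fun q => if min (PySem.Int.floordiv ((q - 1) * Q_buffer + Q_buffer + S - 2) block_w) (-(PySem.Int.floordiv (-W_in) block_w) - 1) ≠ PySem.Int.floordiv (q * Q_buffer) block_w then 1 else 0) * (P_l3 * R_l2 * C_l3 * K_l3)
      + (C_l3 - 1) * K_l3 + (K_l3 - 1) := by
  have hmax2 : max (max Q_l3 0) 1 = max Q_l3 1 := by omega
  rcases lt_or_gt_of_ne hbw with hneg | hpos
  · -- block_w < 0 : m = -block_w, a = -Q_buffer, be = -(Q_buffer + S - 2)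
    have hng : ¬(block_w > 0) := by omega
    have hm : (0:Int) < -block_w := by omega
    simp only [compute_formula_prediction_alt, if_neg hng]
    rw [piece_sum1 (-block_w) (-Q_buffer) (-(Q_buffer + S - 2)) (-(PySem.Int.floordiv (-W_in) block_w) - 1) (max Q_l3 0) _ _ hm (le_max_right _ _) Prod.mk.eta.symm,
      piece_cnt1 (-block_w) (-Q_buffer) (-(Q_buffer + S - 2)) (-(PySem.Int.floordiv (-W_in) block_w) - 1) (max Q_l3 0) _ _ hm (le_max_right _ _) Prod.mk.eta.symm,
      piece_cnt2 (-block_w) (-Q_buffer) (-(Q_buffer + S - 2) - -Q_buffer) (-(PySem.Int.floordiv (-W_in) block_w) - 1) (max (max Q_l3 0) 1) _ _ hm (le_max_right _ _) Prod.mk.eta.symm]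
    rw [hmax2, ISum_max 0 Q_l3, ISum_max 0 Q_l3, ISum_max 1 Q_l3]
    have e1 : ISum 0 Q_l3 (fun q => min (PySem.Int.floordiv (-Q_buffer * q + -(Q_buffer + S - 2)) (-block_w)) (-(PySem.Int.floordiv (-W_in) block_w) - 1) - PySem.Int.floordiv (-Q_buffer * q) (-block_w))
        = ISum 0 Q_l3 (fun q => min (PySem.Int.floordiv (q * Q_buffer + Q_buffer + S - 2) block_w) (-(PySem.Int.floordiv (-W_in) block_w) - 1) - PySem.Int.floordiv (q * Q_buffer) block_w) := by
      refine ISum_congr _ _ _ _ fun q _ _ => ?_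
      rw [show -Q_buffer * q + -(Q_buffer + S - 2) = -(q * Q_buffer + Q_buffer + S - 2) by ring,
        show -Q_buffer * q = -(q * Q_buffer) by ring,
        PySem.Int.floordiv_neg_neg, PySem.Int.floordiv_neg_neg]
    have e2 : ISum 0 Q_l3 (fun q => if PySem.Int.floordiv (-Q_buffer * q) (-block_w) < min (PySem.Int.floordiv (-Q_buffer * q + -(Q_buffer + S - 2)) (-block_w)) (-(PySem.Int.floordiv (-W_in) block_w) - 1) then (1:Int) else 0)
        = ISum 0 Q_l3 (fun q => if PySem.Int.floordiv (q * Q_buffer) block_w < min (PySem.Int.floordiv (q * Q_buffer + Q_buffer + S - 2) block_w) (-(PySem.Int.floordiv (-W_in) block_w) - 1) then (1:Int) else 0) := by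
      refine ISum_congr _ _ _ _ fun q _ _ => ?_
      rw [show -Q_buffer * q + -(Q_buffer + S - 2) = -(q * Q_buffer + Q_buffer + S - 2) by ring,
        show -Q_buffer * q = -(q * Q_buffer) by ring,
        PySem.Int.floordiv_neg_neg, PySem.Int.floordiv_neg_neg]
    have e3 : ISum 1 Q_l3 (fun q => if min (PySem.Int.floordiv (-Q_buffer * q + (-(Q_buffer + S - 2) - -Q_buffer)) (-block_w)) (-(PySem.Int.floordiv (-W_in) block_w) - 1) ≠ PySem.Int.floordiv (-Q_buffer * q) (-block_w) then (1:Int) else 0)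
        = ISum 1 Q_l3 (fun q => if min (PySem.Int.floordiv ((q - 1) * Q_buffer + Q_buffer + S - 2) block_w) (-(PySem.Int.floordiv (-W_in) block_w) - 1) ≠ PySem.Int.floordiv (q * Q_buffer) block_w then (1:Int) else 0) := by
      refine ISum_congr _ _ _ _ fun q _ _ => ?_
      rw [show -Q_buffer * q + (-(Q_buffer + S - 2) - -Q_buffer) = -((q - 1) * Q_buffer + Q_buffer + S - 2) by ring,
        show -Q_buffer * q = -(q * Q_buffer) by ring,
        PySem.Int.floordiv_neg_neg, PySem.Int.floordiv_neg_neg]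
    rw [e1, e2, e3]
  · -- 0 < block_w : m = block_w, a = Q_buffer, be = Q_buffer + S - 2
    simp only [compute_formula_prediction_alt, if_pos hpos]
    rw [piece_sum1 block_w Q_buffer (Q_buffer + S - 2) (-(PySem.Int.floordiv (-W_in) block_w) - 1) (max Q_l3 0) _ _ hpos (le_max_right _ _) Prod.mk.eta.symm,
      piece_cnt1 block_w Q_buffer (Q_buffer + S - 2) (-(PySem.Int.floordiv (-W_in) block_w) - 1) (max Q_l3 0) _ _ hpos (le_max_right _ _) Prod.mk.eta.symm,
      piece_cnt2 block_w Q_buffer (Q_buffer + S - 2 - Q_buffer) (-(PySem.Int.floordiv (-W_in) block_w) - 1) (max (max Q_l3 0) 1) _ _ hpos (le_max_right _ _) Prod.mk.eta.symm]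
    rw [hmax2, ISum_max 0 Q_l3, ISum_max 0 Q_l3, ISum_max 1 Q_l3]
    have e1 : ISum 0 Q_l3 (fun q => min (PySem.Int.floordiv (Q_buffer * q + (Q_buffer + S - 2)) block_w) (-(PySem.Int.floordiv (-W_in) block_w) - 1) - PySem.Int.floordiv (Q_buffer * q) block_w)
        = ISum 0 Q_l3 (fun q => min (PySem.Int.floordiv (q * Q_buffer + Q_buffer + S - 2) block_w) (-(PySem.Int.floordiv (-W_in) block_w) - 1) - PySem.Int.floordiv (q * Q_buffer) block_w) := by
      refine ISum_congr _ _ _ _ fun q _ _ => ?_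
      rw [show Q_buffer * q + (Q_buffer + S - 2) = q * Q_buffer + Q_buffer + S - 2 by ring,
        mul_comm Q_buffer q]
    have e2 : ISum 0 Q_l3 (fun q => if PySem.Int.floordiv (Q_buffer * q) block_w < min (PySem.Int.floordiv (Q_buffer * q + (Q_buffer + S - 2)) block_w) (-(PySem.Int.floordiv (-W_in) block_w) - 1) then (1:Int) else 0)
        = ISum 0 Q_l3 (fun q => if PySem.Int.floordiv (q * Q_buffer) block_w < min (PySem.Int.floordiv (q * Q_buffer + Q_buffer + S - 2) block_w) (-(PySem.Int.floordiv (-W_in) block_w) - 1) then (1:Int) else 0) := by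
      refine ISum_congr _ _ _ _ fun q _ _ => ?_
      rw [show Q_buffer * q + (Q_buffer + S - 2) = q * Q_buffer + Q_buffer + S - 2 by ring,
        mul_comm Q_buffer q]
    have e3 : ISum 1 Q_l3 (fun q => if min (PySem.Int.floordiv (Q_buffer * q + (Q_buffer + S - 2 - Q_buffer)) block_w) (-(PySem.Int.floordiv (-W_in) block_w) - 1) ≠ PySem.Int.floordiv (Q_buffer * q) block_w then (1:Int) else 0)
        = ISum 1 Q_l3 (fun q => if min (PySem.Int.floordiv ((q - 1) * Q_buffer + Q_buffer + S - 2) block_w) (-(PySem.Int.floordiv (-W_in) block_w) - 1) ≠ PySem.Int.floordiv (q * Q_buffer) block_w then (1:Int) else 0) := by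
      refine ISum_congr _ _ _ _ fun q _ _ => ?_
      rw [show Q_buffer * q + (Q_buffer + S - 2 - Q_buffer) = (q - 1) * Q_buffer + Q_buffer + S - 2 by ring,
        mul_comm Q_buffer q]
    rw [e1, e2, e3]

theorem final_eq (P_l3 Q_l3 C_l3 K_l3 R_l2 P_buffer Q_buffer S block_h block_w H_in W_in : Int)
    (hbw : block_w ≠ 0) :
    compute_formula_prediction P_l3 Q_l3 C_l3 K_l3 R_l2 P_buffer Q_buffer S block_h block_w H_in W_in =
      compute_formula_prediction_alt P_l3 Q_l3 C_l3 K_l3 R_l2 P_buffer Q_buffer S block_h block_w H_in W_in := by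
  rw [A_eq, B_eq _ _ _ _ _ _ _ _ _ _ _ _ hbw]

-- ===== VERDICT (by name: the statement is the Claim_ definition above) =====
theorem compute_formula_prediction_spec : Claim_equal_compute_formula_prediction := by
  intro P_l3 Q_l3 C_l3 K_l3 R_l2 P_buffer Q_buffer S block_h block_w H_in W_in _hdom hpre
  unfold Spec_compute_formula_prediction
  exact final_eq P_l3 Q_l3 C_l3 K_l3 R_l2 P_buffer Q_buffer S block_h block_w H_in W_in hpre.2
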